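-- pv_equiv track=rewrite | github.com/shahak2/program-analysis-and-verification | src/transformers/transformer_utils.py | split_string_by_keywords
-- ===== SOURCE A (Python) =====
-- def split_string_by_keywords(input_string,
--                              keywords_list):
--     result = []
--     tokens = input_string.split()
--
--     current_chunk = []
--     for token in tokens:
--         if token in keywords_list:
--             if current_chunk:
--                 result.append(" ".join(current_chunk))
--                 current_chunk = []
--             current_chunk.append(token)
--         else:
--             current_chunk.append(token)
--
--     if current_chunk:
--         result.append(" ".join(current_chunk))
--
--     return result
-- ===== SOURCE B (Python) =====
-- def split_string_by_keywords(input_string, keywords_list):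
--     tokens = input_string.split()
--     bounds = [i for i, t in enumerate(tokens) if t in keywords_list]
--     cuts = ([] if bounds and bounds[0] == 0 else [0]) + bounds + [len(tokens)]
--     segs = [tokens[a:b] for a, b in zip(cuts, cuts[1:])]
--     return [" ".join(seg) for seg in segs if seg]
-- ===== Notes on version B (the rewrite author's own statement) =====
-- stated objective: alternative
-- what changed: Replaces A's single pass with an incremental current-chunk accumulator by a two-phase decomposition: first collect the indices of keyword tokens (the chunk boundaries), then build the result by slicing the token list between consecutive cut points and joining each non-empty slice.
import Mathlib
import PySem

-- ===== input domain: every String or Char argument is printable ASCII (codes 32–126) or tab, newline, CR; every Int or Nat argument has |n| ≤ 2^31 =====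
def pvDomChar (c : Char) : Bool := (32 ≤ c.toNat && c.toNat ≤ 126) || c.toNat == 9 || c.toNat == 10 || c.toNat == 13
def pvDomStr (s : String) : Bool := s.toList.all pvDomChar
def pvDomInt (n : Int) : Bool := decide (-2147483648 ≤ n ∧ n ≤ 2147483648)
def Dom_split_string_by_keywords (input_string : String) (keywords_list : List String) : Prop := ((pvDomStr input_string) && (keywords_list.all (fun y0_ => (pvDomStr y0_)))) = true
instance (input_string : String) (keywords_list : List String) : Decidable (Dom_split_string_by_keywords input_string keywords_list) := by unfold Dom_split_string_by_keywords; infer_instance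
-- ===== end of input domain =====

-- B replaces A's incremental current-chunk accumulator loop by a two-phase decomposition
-- (collect keyword boundary indices, then slice the token list between consecutive cuts);
-- same asymptotic cost, alternative structure.

-- ===== PORT A =====
-- loop body of A's `for token in tokens` (state = (result, current_chunk))
def pvStepA (keywords_list : List String) (st : List String × List String) (token : String) : List String × List String :=
  let result := st.1
  let current_chunk := st.2
  if keywords_list.contains token then
    let result' := if current_chunk ≠ [] then result ++ [PySem.Str.join " " current_chunk] else result
    let current_chunk' := if current_chunk ≠ [] then ([] : List String) else current_chunk
    (result', current_chunk' ++ [token])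
  else (result, current_chunk ++ [token])

-- A's final `if current_chunk: result.append(" ".join(current_chunk))`
def pvFinishA (st : List String × List String) : List String :=
  if st.2 ≠ [] then st.1 ++ [PySem.Str.join " " st.2] else st.1

def split_string_by_keywords (input_string : String) (keywords_list : List String) : List String :=
  let tokens := PySem.Str.split₀ input_string
  pvFinishA (tokens.foldl (pvStepA keywords_list) ([], []))

-- ===== PORT B =====
def split_string_by_keywords_alt (input_string : String) (keywords_list : List String) : List String :=
  let tokens := PySem.Str.split₀ input_string
  let bounds : List Int :=
    ((PySem.List.enumerate tokens 0).filter (fun p => keywords_list.contains p.2)).map Prod.fst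
  let cuts : List Int :=
    (match bounds with
     | [] => [(0 : Int)]
     | b0 :: _ => if b0 = 0 then [] else [(0 : Int)]) ++ bounds ++ [(tokens.length : Int)]
  let segs := (cuts.zip (cuts.drop 1)).map (fun ab => PySem.List.slice tokens (some ab.1) (some ab.2))
  (segs.filter (fun seg => seg ≠ [])).map (fun seg => PySem.Str.join " " seg)

-- ===== PRECONDITION & SPEC =====
def Spec_split_string_by_keywords (input_string : String) (keywords_list : List String) (out : List String) : Prop := out = split_string_by_keywords_alt input_string keywords_list
instance (input_string : String) (keywords_list : List String) (out : List String) : Decidable (Spec_split_string_by_keywords input_string keywords_list out) := by unfold Spec_split_string_by_keywords; infer_instance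

-- ===== CLAIM (what is proved, stated in full; the proofs are below) =====
def Claim_equal_split_string_by_keywords : Prop := ∀ (input_string : String) (keywords_list : List String), Dom_split_string_by_keywords input_string keywords_list → Spec_split_string_by_keywords input_string keywords_list (split_string_by_keywords input_string keywords_list)

-- ===== LEMMAS AND PROOFS =====

-- Nat-level mirror of B's boundary list: indices of keyword tokens
def pvBnds (kws : List String) : List String → List Nat
  | [] => []
  | t :: rest => (if kws.contains t then [0] else []) ++ (pvBnds kws rest).map (· + 1)

def pvCuts (kws : List String) (tokens : List String) : List Nat :=
  (match pvBnds kws tokens with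
   | [] => [0]
   | b0 :: _ => if b0 = 0 then [] else [0]) ++ pvBnds kws tokens ++ [tokens.length]

def pvChunks (kws : List String) (tokens : List String) : List String :=
  (((((pvCuts kws tokens).zip ((pvCuts kws tokens).drop 1)).map
      (fun ab => (tokens.drop ab.1).take (ab.2 - ab.1))).filter (fun seg => seg ≠ []))).map
    (fun seg => PySem.Str.join " " seg)

theorem pvBnds_cast (kws : List String) (ts : List String) : ∀ (s : Int),
    ((PySem.List.enumerate ts s).filter (fun p => kws.contains p.2)).map Prod.fst
      = (pvBnds kws ts).map (fun n : Nat => (n : Int) + s) := by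
  induction ts with
  | nil => intro s; simp [pvBnds, PySem.List.enumerate_nil]
  | cons t rest ih =>
    intro s
    rw [PySem.List.enumerate_cons, List.filter_cons]
    by_cases hb : kws.contains t = true
    · rw [if_pos hb]
      simp only [pvBnds, hb, if_true, List.singleton_append, List.map_cons, ih (s + 1),
        List.map_map]
      congr 1
      · simp
      · apply List.map_congr_left
        intro n _
        simp only [Function.comp_apply]
        push_cast
        ring
    · rw [if_neg hb]
      simp only [pvBnds, hb, Bool.false_eq_true, if_false, List.nil_append, ih (s + 1),
        List.map_map]
      apply List.map_congr_left
      intro n _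
      simp only [Function.comp_apply]
      push_cast
      ring

theorem pvCuts_cast (kws ts : List String) :
    ((match ((PySem.List.enumerate ts (0 : Int)).filter (fun p => kws.contains p.2)).map Prod.fst with
      | [] => [(0 : Int)]
      | b0 :: _ => if b0 = 0 then [] else [(0 : Int)]) ++
        ((PySem.List.enumerate ts (0 : Int)).filter (fun p => kws.contains p.2)).map Prod.fst ++
        [(ts.length : Int)])
      = (pvCuts kws ts).map (fun n : Nat => (n : Int)) := by
  have hb : ((PySem.List.enumerate ts (0 : Int)).filter (fun p => kws.contains p.2)).map Prod.fst
      = (pvBnds kws ts).map (fun n : Nat => (n : Int)) := by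
    rw [pvBnds_cast kws ts 0]; simp
  rw [hb]
  unfold pvCuts
  cases hB : pvBnds kws ts with
  | nil => simp
  | cons b0 bs =>
    simp only [List.map_cons, List.map_append]
    by_cases h0 : b0 = 0
    · subst h0; simp
    · have h0' : ((b0 : Int) = 0) = False := by simp [h0]
      simp [h0]

theorem pvZipShift {α β : Type} (f : α → β) (l : List α) :
    ((l.map f).zip ((l.map f).drop 1)) = (l.zip (l.drop 1)).map (Prod.map f f) := by
  rw [← List.map_drop, List.zip_map]

theorem alt_eq_pvChunks (input_string : String) (kws : List String) :
    split_string_by_keywords_alt input_string kws = pvChunks kws (PySem.Str.split₀ input_string) := by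
  unfold split_string_by_keywords_alt pvChunks
  dsimp only
  rw [pvCuts_cast kws (PySem.Str.split₀ input_string)]
  rw [pvZipShift, List.map_map]
  congr 1
  congr 1
  apply List.map_congr_left
  intro ab _
  obtain ⟨a, b⟩ := ab
  show PySem.List.slice (PySem.Str.split₀ input_string) (some (a : Int)) (some (b : Int))
      = ((PySem.Str.split₀ input_string).drop a).take (b - a)
  exact PySem.List.slice_natCast (PySem.Str.split₀ input_string) a b

theorem pvBnds_append (kws : List String) (xs ys : List String) :
    pvBnds kws (xs ++ ys) = pvBnds kws xs ++ (pvBnds kws ys).map (· + xs.length) := by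
  induction xs with
  | nil => simp [pvBnds]
  | cons x xs ih =>
    show (if kws.contains x then [0] else []) ++ (pvBnds kws (xs ++ ys)).map (· + 1)
        = ((if kws.contains x then [0] else []) ++ (pvBnds kws xs).map (· + 1))
          ++ (pvBnds kws ys).map (· + (xs.length + 1))
    rw [ih, List.map_append, List.map_map, List.append_assoc]
    have h : (pvBnds kws ys).map ((· + 1) ∘ (· + xs.length))
        = (pvBnds kws ys).map (· + (xs.length + 1)) :=
      List.map_congr_left (fun n _ => by simp only [Function.comp_apply]; omega)
    rw [h]

theorem pvBnds_nonkw (kws : List String) (ts : List String)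
    (h : ∀ x ∈ ts, x ∉ kws) : pvBnds kws ts = [] := by
  induction ts with
  | nil => rfl
  | cons t rest ih =>
    have ht := h t (by simp)
    simp [pvBnds, ht, ih (fun x hx => h x (by simp [hx]))]

theorem pvChunks_nil (kws : List String) : pvChunks kws [] = [] := by
  simp [pvChunks, pvCuts, pvBnds]

theorem pvChunks_single (kws : List String) (c : String) (ct : List String)
    (h : ∀ x ∈ ct, x ∉ kws) :
    pvChunks kws (c :: ct) = [PySem.Str.join " " (c :: ct)] := by
  have hb : pvBnds kws (c :: ct) = if c ∈ kws then [0] else [] := by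
    simp [pvBnds, pvBnds_nonkw kws ct h]
  have hcuts : pvCuts kws (c :: ct) = [0, (c :: ct).length] := by
    unfold pvCuts
    rw [hb]
    by_cases hc : c ∈ kws <;> simp [hc]
  simp [pvChunks, hcuts, List.take_length]

theorem pvCuts_keyword_head (kws : List String) (t : String) (rest : List String)
    (ht : t ∈ kws) :
    pvCuts kws (t :: rest) = 0 :: ((pvBnds kws rest).map (· + 1) ++ [(t :: rest).length]) := by
  unfold pvCuts
  simp [pvBnds, ht]

theorem pvChunks_cons_chunk (kws : List String) (t : String) (rest : List String)
    (c : String) (ct : List String) (ht : t ∈ kws)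
    (hct : ∀ x ∈ ct, x ∉ kws) :
    pvChunks kws ((c :: ct) ++ t :: rest)
      = PySem.Str.join " " (c :: ct) :: pvChunks kws (t :: rest) := by
  set cur := c :: ct with hcur
  set q : List Nat := (pvBnds kws rest).map (· + 1) ++ [(t :: rest).length] with hq
  have hcutsTR : pvCuts kws (t :: rest) = 0 :: q := pvCuts_keyword_head kws t rest ht
  have hbcur : pvBnds kws cur = if c ∈ kws then [0] else [] := by
    simp [hcur, pvBnds, pvBnds_nonkw kws ct hct]
  have hbTR : pvBnds kws (t :: rest) = 0 :: (pvBnds kws rest).map (· + 1) := by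
    simp [pvBnds, ht]
  have hbfull : pvBnds kws (cur ++ t :: rest)
      = pvBnds kws cur ++ ((0 :: (pvBnds kws rest).map (· + 1)).map (· + cur.length)) := by
    rw [pvBnds_append, hbTR]
  have hcutsfull : pvCuts kws (cur ++ t :: rest) = 0 :: ((0 :: q).map (· + cur.length)) := by
    unfold pvCuts
    rw [hbfull, hbcur]
    by_cases hc : c ∈ kws
    · rw [if_pos hc]
      simp only [List.singleton_append, List.map_cons, List.map_map]
      simp [hq, hcur, Nat.add_comm]
      omega
    · rw [if_neg hc]
      simp only [List.nil_append, List.map_cons]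
      simp [hq, Nat.add_comm]
  have hsegshift : ∀ ab ∈ ((0 :: q).zip q),
      ((fun ab : Nat × Nat => ((cur ++ t :: rest).drop ab.1).take (ab.2 - ab.1)) ∘
          Prod.map (· + cur.length) (· + cur.length)) ab
        = (fun ab : Nat × Nat => ((t :: rest).drop ab.1).take (ab.2 - ab.1)) ab := by
    intro ab _
    obtain ⟨a, b⟩ := ab
    show ((cur ++ t :: rest).drop (a + cur.length)).take ((b + cur.length) - (a + cur.length))
        = ((t :: rest).drop a).take (b - a)
    have h2 : b + cur.length - (a + cur.length) = b - a := by omega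
    rw [h2, Nat.add_comm a cur.length]
    simp
  have hzip2 : (cur.length :: q.map (· + cur.length)).zip (q.map (· + cur.length))
      = ((0 :: q).zip q).map (Prod.map (· + cur.length) (· + cur.length)) := by
    simpa using pvZipShift (· + cur.length) (0 :: q)
  unfold pvChunks
  rw [hcutsfull, hcutsTR]
  simp only [List.map_cons, List.drop_succ_cons, List.drop_zero, Nat.zero_add, Nat.sub_zero,
    List.zip_cons_cons]
  rw [hzip2]
  simp only [List.map_map]
  rw [List.map_congr_left hsegshift]
  have hfirst : (cur ++ t :: rest).take cur.length = cur := List.take_left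
  rw [hfirst]
  have hcurne : cur ≠ [] := by simp [hcur]
  simp [hcurne]

theorem pvFoldA (kws : List String) : ∀ (ts res cur : List String),
    (∀ x ∈ cur.tail, x ∉ kws) →
    pvFinishA (ts.foldl (pvStepA kws) (res, cur)) = res ++ pvChunks kws (cur ++ ts) := by
  intro ts
  induction ts with
  | nil =>
    intro res cur hinv
    simp only [List.foldl_nil, List.append_nil]
    cases cur with
    | nil => simp [pvFinishA, pvChunks_nil]
    | cons c ct =>
      rw [pvChunks_single kws c ct (by simpa using hinv)]
      simp [pvFinishA]
  | cons t ts' ih =>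
    intro res cur hinv
    rw [List.foldl_cons]
    by_cases ht : t ∈ kws
    · cases cur with
      | nil =>
        have hstep : pvStepA kws (res, ([] : List String)) t = (res, [t]) := by
          simp [pvStepA, ht]
        rw [hstep, ih res [t] (by simp)]
        simp
      | cons c ct =>
        have hstep : pvStepA kws (res, c :: ct) t
            = (res ++ [PySem.Str.join " " (c :: ct)], [t]) := by
          simp [pvStepA, ht]
        rw [hstep, ih (res ++ [PySem.Str.join " " (c :: ct)]) [t] (by simp)]
        rw [pvChunks_cons_chunk kws t ts' c ct ht (by simpa using hinv)]
        simp
    · have hstep : pvStepA kws (res, cur) t = (res, cur ++ [t]) := by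
        simp [pvStepA, ht]
      have hinv' : ∀ x ∈ (cur ++ [t]).tail, x ∉ kws := by
        cases cur with
        | nil => simp
        | cons c ct =>
          intro x hx
          simp only [List.cons_append, List.tail_cons, List.mem_append, List.mem_singleton] at hx
          rcases hx with hx | rfl
          · exact hinv x (by simpa using hx)
          · exact ht
      rw [hstep, ih res (cur ++ [t]) hinv']
      simp

-- ===== VERDICT (by name: the statement is the Claim_ definition above) =====
theorem split_string_by_keywords_spec : Claim_equal_split_string_by_keywords := by
  intro input_string keywords_list _
  unfold Spec_split_string_by_keywords
  rw [alt_eq_pvChunks]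
  unfold split_string_by_keywords
  dsimp only
  rw [pvFoldA keywords_list (PySem.Str.split₀ input_string) [] [] (by simp)]
  simp
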